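-- pv_equiv track=rewrite | github.com/dbosnja/adventsOfCode | 2019/day12/part1.py | activate_gravity
-- ===== SOURCE A (Python) =====
-- def activate_gravity(planets, vec_planet_map):
--     for i, planet_i in enumerate(planets):
--         pl_i_vel_map = vec_planet_map[i]
--         for planet_j in planets:
--             if planet_i == planet_j:
--                 continue
--             for coord_idx, (coord_i, coord_j) in enumerate(zip(planet_i, planet_j)):
--                 if coord_i < coord_j:
--                     pl_i_vel_map[coord_idx] += 1
--                 elif coord_i > coord_j:
--                     pl_i_vel_map[coord_idx] -= 1
--         vec_planet_map[i] = pl_i_vel_map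
--     return vec_planet_map
-- ===== SOURCE B (Python) =====
-- def activate_gravity(planets, vec_planet_map):
--     max_len = 0
--     for p in planets:
--         if len(p) > max_len:
--             max_len = len(p)
--     for c in range(max_len):
--         vals = sorted(p[c] for p in planets if len(p) > c)
--         n = len(vals)
--         delta = {}
--         start = 0
--         for k in range(n):
--             if k + 1 == n or vals[k + 1] != vals[k]:
--                 delta[vals[k]] = (n - (k + 1)) - start
--                 start = k + 1
--         for i, p in enumerate(planets):
--             if len(p) > c:
--                 vec_planet_map[i][c] += delta[p[c]]
--     return vec_planet_map
-- ===== Notes on version B (the rewrite author's own statement) =====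
-- stated objective: faster
-- what changed: Replaces A's all-pairs nested comparison (every planet against every other, per coordinate) by a column-major pass: per coordinate sort the column once, derive each value's velocity delta (#greater - #less) in one run-length sweep stored in a dict, then apply it to every planet by lookup.
-- outside the precondition, e.g. on activate_gravity([[1], [1]], [[], []]): A returns [[], []], B raises IndexError; on activate_gravity([[0, 5], [0]], [[0], [0]]): A returns [[0], [0]], B raises IndexError
import Mathlib
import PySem

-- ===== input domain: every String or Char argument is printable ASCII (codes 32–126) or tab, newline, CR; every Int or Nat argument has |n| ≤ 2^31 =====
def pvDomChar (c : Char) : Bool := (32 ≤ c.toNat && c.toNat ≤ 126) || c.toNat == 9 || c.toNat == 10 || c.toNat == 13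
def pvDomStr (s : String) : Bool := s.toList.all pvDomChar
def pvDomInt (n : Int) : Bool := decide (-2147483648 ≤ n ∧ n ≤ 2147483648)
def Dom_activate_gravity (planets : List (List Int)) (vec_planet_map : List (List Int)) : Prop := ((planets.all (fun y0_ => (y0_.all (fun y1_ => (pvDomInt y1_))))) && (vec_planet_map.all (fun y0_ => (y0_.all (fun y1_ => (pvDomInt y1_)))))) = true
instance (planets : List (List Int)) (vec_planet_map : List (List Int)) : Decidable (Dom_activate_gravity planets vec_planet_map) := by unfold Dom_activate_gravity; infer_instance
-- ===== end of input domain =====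

-- B replaces A's all-pairs nested comparison by a per-coordinate sort + run-length
-- delta dictionary (measured asymptotically faster); both Pythons mutate
-- vec_planet_map in place the same way — the equivalence proved is about the return value.


-- ===== PORT A =====
-- helpers: the three nested loops of A, innermost first
def agInner (row : List Int) (idx : Nat) (pairs : List (Int × Int)) : List Int :=
  match pairs with
  | [] => row
  | (ci, cj) :: rest =>
    if ci < cj then agInner (row.set idx (PySem.List.pyGetD row (idx : Int) 0 + 1)) (idx + 1) rest
    else if cj < ci then agInner (row.set idx (PySem.List.pyGetD row (idx : Int) 0 - 1)) (idx + 1) rest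
    else agInner row (idx + 1) rest

def agMid (pli : List Int) (row : List Int) (ps : List (List Int)) : List Int :=
  match ps with
  | [] => row
  | pj :: rest => agMid pli (if pli = pj then row else agInner row 0 (pli.zip pj)) rest

def agOuter (ps : List (List Int)) (allp : List (List Int)) (i : Nat) (vec : List (List Int)) : List (List Int) :=
  match ps with
  | [] => vec
  | pli :: rest =>
    agOuter rest allp (i + 1) (vec.set i (agMid pli (PySem.List.pyGetD vec (i : Int) []) allp))

def activate_gravity (planets : List (List Int)) (vec_planet_map : List (List Int)) : List (List Int) :=
  agOuter planets planets 0 vec_planet_map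

-- ===== PORT B =====
-- helpers: Source B's max-length scan, per-column sorted values, run-length delta dict, apply loop, column loop
def bMaxLen (ps : List (List Int)) (m : Nat) : Nat :=
  match ps with
  | [] => m
  | p :: rest => bMaxLen rest (if m < p.length then p.length else m)

def bColVals (planets : List (List Int)) (c : Nat) : List Int :=
  PySem.List.sorted
    ((planets.filter (fun p => decide (c < p.length))).map (fun p => PySem.List.pyGetD p (c : Int) 0))
    (fun x => x) false

def bDeltaLoop (n : Nat) (start k : Nat) (vs : List Int) (d : PySem.Dict Int Int) : PySem.Dict Int Int :=
  match vs with
  | [] => d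
  | v :: rest =>
    if rest.head? ≠ some v then
      bDeltaLoop n (k + 1) (k + 1) rest (d.insert v (((n : Int) - ((k : Int) + 1)) - (start : Int)))
    else bDeltaLoop n start (k + 1) rest d

def bApply (d : PySem.Dict Int Int) (c : Nat) (i : Nat) (ps : List (List Int)) (vec : List (List Int)) : List (List Int) :=
  match ps with
  | [] => vec
  | p :: rest =>
    let vec' :=
      if c < p.length then
        vec.set i ((PySem.List.pyGetD vec (i : Int) []).set c
          (PySem.List.pyGetD (PySem.List.pyGetD vec (i : Int) []) (c : Int) 0 +
            ((d.get? (PySem.List.pyGetD p (c : Int) 0)).getD 0)))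
      else vec
    bApply d c (i + 1) rest vec'

def bCols (cs : List Nat) (planets : List (List Int)) (vec : List (List Int)) : List (List Int) :=
  match cs with
  | [] => vec
  | c :: rest =>
    bCols rest planets (bApply (bDeltaLoop (bColVals planets c).length 0 0 (bColVals planets c) PySem.Dict.empty) c 0 planets vec)

def activate_gravity_alt (planets : List (List Int)) (vec_planet_map : List (List Int)) : List (List Int) :=
  bCols (List.range (bMaxLen planets 0)) planets vec_planet_map

-- ===== PRECONDITION & SPEC =====
-- Pre_ excludes inputs where a velocity row is shorter than its planet's coordinate list:
-- there A raises IndexError on the first strict comparison that reaches the missing slot, and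
-- returns only if every comparison that reaches it happens to tie (B raises IndexError there).
def Pre_activate_gravity (planets : List (List Int)) (vec_planet_map : List (List Int)) : Prop :=
  planets.length ≤ vec_planet_map.length ∧
  ∀ pr ∈ planets.zip vec_planet_map, pr.1.length ≤ pr.2.length
instance (planets : List (List Int)) (vec_planet_map : List (List Int)) : Decidable (Pre_activate_gravity planets vec_planet_map) := by unfold Pre_activate_gravity; infer_instance

def pvWitness_activate_gravity : List (List Int) × List (List Int) :=
  ([[1, 2], [3, 4], [1, 0]], [[0, 0], [0, 0], [0, 0]])

def Spec_activate_gravity (planets : List (List Int)) (vec_planet_map : List (List Int)) (out : List (List Int)) : Prop := out = activate_gravity_alt planets vec_planet_map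
instance (planets : List (List Int)) (vec_planet_map : List (List Int)) (out : List (List Int)) : Decidable (Spec_activate_gravity planets vec_planet_map out) := by unfold Spec_activate_gravity; infer_instance

-- ===== CLAIM (what is proved, stated in full; the proofs are below) =====
def Claim_equal_activate_gravity : Prop := ∀ (planets : List (List Int)) (vec_planet_map : List (List Int)), Dom_activate_gravity planets vec_planet_map → Pre_activate_gravity planets vec_planet_map → Spec_activate_gravity planets vec_planet_map (activate_gravity planets vec_planet_map)

-- ===== LEMMAS AND PROOFS =====
-- the common characterization: per coordinate, velocity delta = (#strictly greater) - (#strictly less)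
def sgn (a b : Int) : Int := if a < b then 1 else if b < a then -1 else 0

def colRaw (ps : List (List Int)) (c : Nat) : List Int :=
  (ps.filter (fun p => decide (c < p.length))).map (fun p => p.getD c 0)

def colDelta (ps : List (List Int)) (c : Nat) (x : Int) : Int :=
  (ps.map (fun p => if c < p.length then sgn x (p.getD c 0) else 0)).sum

def pairVal (pairs : List (Int × Int)) (idx c : Nat) : Int :=
  match pairs with
  | [] => 0
  | (a, b) :: rest => if c = idx then sgn a b else pairVal rest (idx + 1) c

theorem pairVal_of_lt (pairs : List (Int × Int)) (idx c : Nat) (h : c < idx) :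
    pairVal pairs idx c = 0 := by
  induction pairs generalizing idx with
  | nil => rfl
  | cons hd tl ih =>
    cases hd
    simp only [pairVal, if_neg (Nat.ne_of_lt h)]
    exact ih _ (by omega)

theorem getD_set_ite_P {α : Type} (row : List α) (i c : Nat) (v d0 : α) :
    (row.set i v).getD c d0 = if c = i ∧ i < row.length then v else row.getD c d0 := by
  simp only [List.getD_eq_getElem?_getD, List.getElem?_set]
  split_ifs with h1 h2 h3 <;> simp_all

theorem length_agInner (pairs : List (Int × Int)) (row : List Int) (idx : Nat) :
    (agInner row idx pairs).length = row.length := by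
  induction pairs generalizing row idx with
  | nil => rfl
  | cons hd tl ih =>
    cases hd with
    | mk ci cj =>
      simp only [agInner]
      split_ifs <;> simp [ih, List.length_set]

theorem agInner_getD (pairs : List (Int × Int)) (row : List Int) (idx : Nat)
    (hlen : idx + pairs.length ≤ row.length) (c : Nat) :
    (agInner row idx pairs).getD c 0 = row.getD c 0 + pairVal pairs idx c := by
  induction pairs generalizing row idx with
  | nil => simp [agInner, pairVal]
  | cons hd rest ih =>
    obtain ⟨ci, cj⟩ := hd
    have hidx : idx < row.length := by simp at hlen; omega
    have hlen' : ∀ v : Int, idx + 1 + rest.length ≤ (row.set idx v).length := by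
      intro v; simp at hlen ⊢; omega
    simp only [agInner, PySem.List.pyGetD_natCast]
    by_cases hc : c = idx
    · subst hc
      simp only [pairVal, if_true]
      split_ifs with h1 h2
      · rw [ih _ _ (hlen' _), getD_set_ite_P, pairVal_of_lt rest (c + 1) c (by omega)]
        simp [sgn, h1, hidx]
      · rw [ih _ _ (hlen' _), getD_set_ite_P, pairVal_of_lt rest (c + 1) c (by omega)]
        simp [sgn, h2, hidx, not_lt.mpr (le_of_lt h2)]; ring
      · rw [ih _ _ (by simp at hlen ⊢; omega), pairVal_of_lt rest (c + 1) c (by omega)]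
        have : ci = cj := le_antisymm (not_lt.mp h2) (not_lt.mp h1)
        simp [sgn, this]
    · simp only [pairVal, if_neg hc]
      split_ifs with h1 h2
      · rw [ih _ _ (hlen' _), getD_set_ite_P]; simp [hc]
      · rw [ih _ _ (hlen' _), getD_set_ite_P]; simp [hc]
      · rw [ih _ _ (by simp at hlen ⊢; omega)]

theorem pairVal_zip (pli pj : List Int) (idx c : Nat) :
    pairVal (pli.zip pj) idx c =
      if idx ≤ c ∧ c - idx < min pli.length pj.length then
        sgn (pli.getD (c - idx) 0) (pj.getD (c - idx) 0)
      else 0 := by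
  induction pli generalizing pj idx with
  | nil => simp [pairVal]
  | cons a as ih =>
    cases pj with
    | nil => simp [pairVal]
    | cons b bs =>
      simp only [List.zip_cons_cons, pairVal]
      by_cases hc : c = idx
      · subst hc
        simp
      · rw [ih bs (idx + 1)]
        have h1 : (idx + 1 ≤ c ∧ c - (idx + 1) < min as.length bs.length) ↔
            (idx ≤ c ∧ c - idx < min (a :: as).length (b :: bs).length) := by
          simp only [List.length_cons]; omega
        by_cases hcond : idx + 1 ≤ c ∧ c - (idx + 1) < min as.length bs.length
        · rw [if_pos hcond, if_pos (h1.mp hcond), if_neg hc]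
          have he : c - idx = (c - (idx + 1)) + 1 := by omega
          rw [he]
          simp
        · rw [if_neg hcond, if_neg (fun h => hcond (h1.mpr h)), if_neg hc]

theorem length_agMid (ps : List (List Int)) (pli row : List Int)
    (h : pli.length ≤ row.length) :
    (agMid pli row ps).length = row.length := by
  induction ps generalizing row with
  | nil => rfl
  | cons pj rest ih =>
    simp only [agMid]
    by_cases hpq : pli = pj
    · rw [if_pos hpq]; exact ih row h
    · rw [if_neg hpq]
      have hz : (0 : Nat) + (pli.zip pj).length ≤ row.length := by
        simp [List.length_zip]; omega
      rw [ih _ (by rw [length_agInner]; exact h)]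
      exact length_agInner _ _ _

theorem agMid_getD (ps : List (List Int)) (pli row : List Int)
    (h : pli.length ≤ row.length) (c : Nat) :
    (agMid pli row ps).getD c 0 =
      row.getD c 0 + (ps.map (fun pj => if c < min pli.length pj.length then sgn (pli.getD c 0) (pj.getD c 0) else 0)).sum := by
  induction ps generalizing row with
  | nil => simp [agMid]
  | cons pj rest ih =>
    simp only [agMid, List.map_cons, List.sum_cons]
    by_cases hpq : pli = pj
    · subst hpq
      rw [if_pos rfl, ih row h]
      have : (if c < min pli.length pli.length then sgn (pli.getD c 0) (pli.getD c 0) else 0) = 0 := by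
        split_ifs <;> simp [sgn]
      rw [this]; ring
    · rw [if_neg hpq]
      have hz : (0 : Nat) + (pli.zip pj).length ≤ row.length := by
        simp [List.length_zip]; omega
      rw [ih _ (by rw [length_agInner]; exact h), agInner_getD _ _ _ hz, pairVal_zip]
      simp only [Nat.zero_le, Nat.sub_zero, true_and]
      ring

theorem length_agOuter (ps allp : List (List Int)) (i : Nat) (vec : List (List Int)) :
    (agOuter ps allp i vec).length = vec.length := by
  induction ps generalizing i vec with
  | nil => rfl
  | cons pli rest ih => simp [agOuter, ih]

theorem agOuter_getD (ps allp : List (List Int)) (i : Nat) (vec : List (List Int))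
    (hi : i + ps.length ≤ vec.length) (j : Nat) :
    (agOuter ps allp i vec).getD j [] =
      if i ≤ j ∧ j < i + ps.length then agMid (ps.getD (j - i) []) (vec.getD j []) allp
      else vec.getD j [] := by
  induction ps generalizing i vec with
  | nil =>
    simp only [agOuter, List.length_nil]
    rw [if_neg (by omega)]
  | cons pli rest ih =>
    have hiv : i < vec.length := by simp at hi; omega
    simp only [agOuter, PySem.List.pyGetD_natCast]
    rw [ih (i + 1) _ (by simp at hi ⊢; omega)]
    simp only [getD_set_ite_P, List.length_cons]
    split_ifs with h1 h2 h3 h4 h5 <;> try (exfalso; omega)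
    all_goals first
      | rfl
      | (rw [show j - i = (j - (i + 1)) + 1 from by omega, List.getD_cons_succ])
      | (obtain ⟨rfl, -⟩ := ‹j = i ∧ i < vec.length›; simp)

theorem le_bMaxLen (ps : List (List Int)) (m : Nat) : m ≤ bMaxLen ps m := by
  induction ps generalizing m with
  | nil => exact le_refl m
  | cons p rest ih =>
    simp only [bMaxLen]
    split_ifs with h
    · exact le_trans (le_of_lt h) (ih _)
    · exact ih _

theorem length_le_bMaxLen (ps : List (List Int)) (m : Nat) (p : List Int) (hp : p ∈ ps) :
    p.length ≤ bMaxLen ps m := by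
  induction ps generalizing m with
  | nil => cases hp
  | cons q rest ih =>
    simp only [bMaxLen]
    rcases List.mem_cons.mp hp with rfl | hmem
    · split_ifs with h
      · exact le_bMaxLen _ _
      · exact le_trans (not_lt.mp h) (le_bMaxLen _ _)
    · exact ih _ hmem

theorem bDeltaLoop_get (vs : List Int) (d : PySem.Dict Int Int) (n start k : Nat)
    (hs : vs.Pairwise (· ≤ ·)) (hn : k + vs.length = n) (hsk : start ≤ k) (x : Int) :
    (bDeltaLoop n start k vs d).get? x =
      if x ∈ vs then
        some (((n - (k + vs.countP (fun y => decide (y ≤ x))) : Nat) : Int) -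
          (if vs.head? = some x then (start : Int) else ((k + vs.countP (fun y => decide (y < x)) : Nat) : Int)))
      else d.get? x := by
  induction vs generalizing d start k with
  | nil => simp [bDeltaLoop]
  | cons v rest ih =>
    have hle : ∀ y ∈ rest, v ≤ y := (List.pairwise_cons.mp hs).1
    have hs' : rest.Pairwise (· ≤ ·) := (List.pairwise_cons.mp hs).2
    have hn' : (k + 1) + rest.length = n := by simp at hn; omega
    by_cases hb : rest.head? = some v
    · -- no boundary: vals[k+1] == vals[k], loop just advances k
      have hvrest : v ∈ rest := by
        cases rest with
        | nil => simp at hb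
        | cons r rs => simp at hb; subst hb; exact List.mem_cons_self
      have hstep : bDeltaLoop n start k (v :: rest) d = bDeltaLoop n start (k + 1) rest d := by
        simp [bDeltaLoop, hb]
      rw [hstep, ih d start (k + 1) hs' hn' (by omega)]
      by_cases hx : x ∈ rest
      · rw [if_pos hx, if_pos (List.mem_cons_of_mem v hx)]
        have hvx : v ≤ x := hle x hx
        by_cases hh : v = x
        · have hhr : rest.head? = some x := by rw [hb, hh]
          rw [if_pos hhr, if_pos (by simp [hh])]
          simp only [List.countP_cons, decide_eq_true_eq]
          congr 1
          simp [hvx]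
          omega
        · have hhr : rest.head? ≠ some x := by rw [hb]; simp [hh]
          rw [if_neg hhr, if_neg (by simp [hh])]
          have hvltx : v < x := lt_of_le_of_ne hvx hh
          simp only [List.countP_cons, decide_eq_true_eq]
          congr 1 <;> simp [hvx, hvltx] <;> omega
      · have hxv : x ≠ v := fun h => hx (h ▸ hvrest)
        rw [if_neg hx, if_neg (by simp [hx, hxv])]
    · -- boundary: record the run of v, reset start
      have hvlt : ∀ y ∈ rest, v < y := by
        intro y hy
        rcases eq_or_lt_of_le (hle y hy) with heq | h
        · exfalso
          apply hb
          cases rest with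
          | nil => cases hy
          | cons r rs =>
            have hvr : v ≤ r := hle r List.mem_cons_self
            have hry : r ≤ y := by
              rcases List.mem_cons.mp hy with rfl | hy'
              · exact le_refl y
              · exact (List.pairwise_cons.mp hs').1 y hy'
            have : r = v := le_antisymm (heq ▸ hry) hvr
            simp [this]
        · exact h
      have hvnot : v ∉ rest := fun hv => lt_irrefl v (hvlt v hv)
      have hstep : bDeltaLoop n start k (v :: rest) d =
          bDeltaLoop n (k + 1) (k + 1) rest (d.insert v (((n : Int) - ((k : Int) + 1)) - (start : Int))) := by
        simp [bDeltaLoop, hb]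
      rw [hstep, ih _ (k + 1) (k + 1) hs' hn' le_rfl]
      by_cases hx : x ∈ rest
      · have hxv : x ≠ v := fun h => hvnot (h ▸ hx)
        rw [if_pos hx, if_pos (List.mem_cons_of_mem v hx)]
        have hsimp : (if rest.head? = some x then ((k + 1 : Nat) : Int)
            else (((k + 1) + rest.countP (fun y => decide (y < x)) : Nat) : Int)) =
            (((k + 1) + rest.countP (fun y => decide (y < x)) : Nat) : Int) := by
          split_ifs with hh
          · have hz : rest.countP (fun y => decide (y < x)) = 0 := by
              rw [List.countP_eq_zero]
              intro y hy
              cases rest with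
              | nil => cases hy
              | cons r rs =>
                have hrx : r = x := by simpa using hh
                have hry : r ≤ y := by
                  rcases List.mem_cons.mp hy with rfl | hy'
                  · exact le_refl y
                  · exact (List.pairwise_cons.mp hs').1 y hy'
                simp
                omega
            rw [hz]
          · rfl
        rw [hsimp]
        have hvltx : v < x := hvlt x hx
        rw [if_neg (by simp [Ne.symm hxv])]
        simp only [List.countP_cons, decide_eq_true_eq]
        congr 1 <;> simp [le_of_lt hvltx, hvltx] <;> omega
      · by_cases hxv : x = v
        · subst hxv
          rw [if_neg hx, PySem.Dict.get?_insert_self, if_pos List.mem_cons_self]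
          have hc0 : rest.countP (fun y => decide (y ≤ x)) = 0 := by
            rw [List.countP_eq_zero]
            intro y hy
            simp
            exact hvlt y hy
          simp only [List.countP_cons, decide_eq_true_eq, hc0, List.head?_cons]
          rw [if_pos (le_refl x), if_pos trivial]
          congr 1
          omega
        · rw [if_neg hx, if_neg (by simp [hx, hxv])]
          exact PySem.Dict.get?_insert_of_ne _ _ hxv

theorem countP_le_add_lt (vals : List Int) (x : Int) :
    vals.countP (fun y => decide (y ≤ x)) + vals.countP (fun y => decide (x < y)) = vals.length := by
  induction vals with
  | nil => rfl
  | cons v rest ih =>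
    simp only [List.countP_cons, decide_eq_true_eq, List.length_cons]
    by_cases h : v ≤ x
    · simp [h, not_lt.mpr h]; omega
    · simp [h, not_le.mp h]; omega

theorem bDelta_getD (vals : List Int) (hs : vals.Pairwise (· ≤ ·)) (x : Int) (hx : x ∈ vals) :
    ((bDeltaLoop vals.length 0 0 vals PySem.Dict.empty).get? x).getD 0 =
      ((vals.countP (fun y => decide (x < y)) : Int) - (vals.countP (fun y => decide (y < x)) : Int)) := by
  rw [bDeltaLoop_get vals _ vals.length 0 0 hs (by omega) le_rfl x, if_pos hx]
  have hc := countP_le_add_lt vals x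
  have hhead : (if vals.head? = some x then ((0:Nat):Int) else ((0 + vals.countP (fun y => decide (y < x)) : Nat) : Int)) = (vals.countP (fun y => decide (y < x)) : Int) := by
    split_ifs with hh
    · have hz : vals.countP (fun y => decide (y < x)) = 0 := by
        rw [List.countP_eq_zero]
        intro y hy
        cases vals with
        | nil => cases hy
        | cons r rs =>
          have hrx : r = x := by simpa using hh
          have hry : r ≤ y := by
            rcases List.mem_cons.mp hy with rfl | hy'
            · exact le_refl y
            · exact (List.pairwise_cons.mp hs).1 y hy'
          simp
          omega
      rw [hz]
    · simp
  rw [hhead]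
  simp only [Option.getD_some]
  congr 1
  omega

theorem colDelta_eq_counts (ps : List (List Int)) (c : Nat) (x : Int) :
    colDelta ps c x =
      ((colRaw ps c).countP (fun y => decide (x < y)) : Int) -
      ((colRaw ps c).countP (fun y => decide (y < x)) : Int) := by
  induction ps with
  | nil => simp [colDelta, colRaw]
  | cons p rest ih =>
    simp only [colDelta, colRaw, List.map_cons, List.sum_cons, List.filter_cons] at ih ⊢
    by_cases hc : c < p.length
    · rw [if_pos hc, if_pos (by simp [hc])]
      simp only [List.map_cons, List.countP_cons, decide_eq_true_eq]
      rcases lt_trichotomy x (p.getD c 0) with h | h | h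
      · rw [show sgn x (p.getD c 0) = 1 from if_pos h,
            if_pos h, if_neg (not_lt.mpr (le_of_lt h))]
        push_cast
        omega
      · rw [show sgn x (p.getD c 0) = 0 by simp [sgn, h],
            if_neg (by omega), if_neg (by omega)]
        push_cast
        omega
      · rw [show sgn x (p.getD c 0) = -1 by
              simp only [sgn, if_neg (by omega : ¬ x < p.getD c 0), if_pos h],
            if_neg (by omega), if_pos h]
        push_cast
        omega
    · rw [if_neg hc, if_neg (by simp [hc])]
      rw [ih]
      ring

theorem bColVals_eq_sorted (planets : List (List Int)) (c : Nat) :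
    bColVals planets c = PySem.List.sorted (colRaw planets c) (fun x => x) false := by
  simp [bColVals, colRaw, PySem.List.pyGetD_natCast]

theorem bDelta_col (planets : List (List Int)) (c : Nat) (x : Int) (hx : x ∈ colRaw planets c) :
    ((bDeltaLoop (bColVals planets c).length 0 0 (bColVals planets c) PySem.Dict.empty).get? x).getD 0 =
      colDelta planets c x := by
  rw [bColVals_eq_sorted]
  have hperm : (PySem.List.sorted (colRaw planets c) (fun x => x) false).Perm (colRaw planets c) :=
    PySem.List.sorted_perm _ _ _
  have hs : (PySem.List.sorted (colRaw planets c) (fun x => x) false).Pairwise (· ≤ ·) := by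
    simpa using PySem.List.sorted_pairwise (colRaw planets c) (fun x => x)
  rw [bDelta_getD _ hs x (hperm.mem_iff.mpr hx), hperm.countP_eq, hperm.countP_eq,
    colDelta_eq_counts]

theorem length_bApply (d : PySem.Dict Int Int) (c i : Nat) (ps vec : List (List Int)) :
    (bApply d c i ps vec).length = vec.length := by
  induction ps generalizing i vec with
  | nil => rfl
  | cons p rest ih =>
    simp only [bApply]
    split_ifs <;> simp [ih]

theorem bApply_getD (d : PySem.Dict Int Int) (c i : Nat) (ps vec : List (List Int))
    (hi : i + ps.length ≤ vec.length) (j : Nat) :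
    (bApply d c i ps vec).getD j [] =
      if i ≤ j ∧ j < i + ps.length ∧ c < (ps.getD (j - i) []).length then
        (vec.getD j []).set c ((vec.getD j []).getD c 0 + (d.get? ((ps.getD (j - i) []).getD c 0)).getD 0)
      else vec.getD j [] := by
  induction ps generalizing i vec with
  | nil =>
    simp only [bApply, List.length_nil]
    rw [if_neg (by omega)]
  | cons p rest ih =>
    have hiv : i < vec.length := by simp at hi; omega
    simp only [bApply, PySem.List.pyGetD_natCast]
    by_cases hcp : c < p.length
    · rw [if_pos hcp, ih (i + 1) _ (by simp at hi ⊢; omega)]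
      by_cases hj : j = i
      · subst hj
        rw [if_neg (by omega), getD_set_ite_P, if_pos ⟨rfl, hiv⟩,
          if_pos (by
            refine ⟨le_refl _, by simp only [List.length_cons]; omega, ?_⟩
            simpa [Nat.sub_self] using hcp)]
        simp
      · have hv : ∀ r : List Int, (vec.set i r).getD j [] = vec.getD j [] := by
          intro r
          rw [getD_set_ite_P]
          exact if_neg (by tauto)
        simp only [hv]
        rcases Nat.lt_or_ge j i with hji | hji
        · rw [if_neg (by omega), if_neg (by omega)]
        · have hg : ((p :: rest).getD (j - i) []) = rest.getD (j - (i + 1)) [] := by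
            rw [show j - i = (j - (i + 1)) + 1 from by omega, List.getD_cons_succ]
          rw [hg]
          have hlc : (i ≤ j ∧ j < i + (p :: rest).length ∧ c < (rest.getD (j - (i + 1)) []).length) ↔
              (i + 1 ≤ j ∧ j < i + 1 + rest.length ∧ c < (rest.getD (j - (i + 1)) []).length) := by
            simp only [List.length_cons]
            constructor <;> (rintro ⟨a, b, cc⟩; exact ⟨by omega, by omega, cc⟩)
          by_cases hcond : i + 1 ≤ j ∧ j < i + 1 + rest.length ∧ c < (rest.getD (j - (i + 1)) []).length
          · rw [if_pos hcond, if_pos (hlc.mpr hcond)]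
          · rw [if_neg hcond, if_neg (fun h => hcond (hlc.mp h))]
    · rw [if_neg hcp, ih (i + 1) _ (by simp at hi ⊢; omega)]
      by_cases hj : j = i
      · subst hj
        rw [if_neg (by omega), if_neg (by
          rintro ⟨-, -, h⟩
          exact hcp (by simpa [Nat.sub_self] using h))]
      · rcases Nat.lt_or_ge j i with hji | hji
        · rw [if_neg (by omega), if_neg (by omega)]
        · have hg : ((p :: rest).getD (j - i) []) = rest.getD (j - (i + 1)) [] := by
            rw [show j - i = (j - (i + 1)) + 1 from by omega, List.getD_cons_succ]
          rw [hg]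
          have hlc : (i ≤ j ∧ j < i + (p :: rest).length ∧ c < (rest.getD (j - (i + 1)) []).length) ↔
              (i + 1 ≤ j ∧ j < i + 1 + rest.length ∧ c < (rest.getD (j - (i + 1)) []).length) := by
            simp only [List.length_cons]
            constructor <;> (rintro ⟨a, b, cc⟩; exact ⟨by omega, by omega, cc⟩)
          by_cases hcond : i + 1 ≤ j ∧ j < i + 1 + rest.length ∧ c < (rest.getD (j - (i + 1)) []).length
          · rw [if_pos hcond, if_pos (hlc.mpr hcond)]
          · rw [if_neg hcond, if_neg (fun h => hcond (hlc.mp h))]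

theorem mem_colRaw (planets : List (List Int)) (j c : Nat)
    (hj : j < planets.length) (hc : c < (planets.getD j []).length) :
    (planets.getD j []).getD c 0 ∈ colRaw planets c := by
  have hp : planets.getD j [] ∈ planets := by
    rw [List.getD_eq_getElem planets [] hj]
    exact List.getElem_mem hj
  unfold colRaw
  exact List.mem_map.mpr ⟨planets.getD j [], List.mem_filter.mpr ⟨hp, by simpa using hc⟩, rfl⟩

theorem bApply_entry (d : PySem.Dict Int Int) (c0 : Nat) (planets vec : List (List Int))
    (hlen : planets.length ≤ vec.length)
    (hrow : ∀ j, j < planets.length → (planets.getD j []).length ≤ (vec.getD j []).length)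
    (j c : Nat) :
    ((bApply d c0 0 planets vec).getD j []).getD c 0 =
      (vec.getD j []).getD c 0 +
        (if j < planets.length ∧ c = c0 ∧ c0 < (planets.getD j []).length
         then (d.get? ((planets.getD j []).getD c0 0)).getD 0 else 0) := by
  rw [bApply_getD d c0 0 planets vec (by omega) j]
  simp only [Nat.zero_add, Nat.sub_zero, Nat.zero_le, true_and]
  by_cases hB : j < planets.length ∧ c = c0 ∧ c0 < (planets.getD j []).length
  · obtain ⟨hj, rfl, hc0⟩ := hB
    rw [if_pos ⟨hj, hc0⟩, if_pos ⟨hj, rfl, hc0⟩, getD_set_ite_P,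
      if_pos ⟨rfl, lt_of_lt_of_le hc0 (hrow j hj)⟩]
  · rw [if_neg hB]
    by_cases hA : j < planets.length ∧ c0 < (planets.getD j []).length
    · rw [if_pos hA, getD_set_ite_P, if_neg (by
        rintro ⟨rfl, -⟩
        exact hB ⟨hA.1, rfl, hA.2⟩)]
      ring
    · rw [if_neg hA]
      ring

theorem length_row_bApply (d : PySem.Dict Int Int) (c0 : Nat) (planets vec : List (List Int))
    (hlen : planets.length ≤ vec.length) (j : Nat) :
    ((bApply d c0 0 planets vec).getD j []).length = (vec.getD j []).length := by
  rw [bApply_getD d c0 0 planets vec (by omega) j]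
  split_ifs <;> simp [List.length_set]

theorem length_bCols (cs : List Nat) (planets vec : List (List Int)) :
    (bCols cs planets vec).length = vec.length := by
  induction cs generalizing vec with
  | nil => rfl
  | cons c0 rest ih => simp only [bCols]; rw [ih, length_bApply]

theorem length_row_bCols (cs : List Nat) (planets vec : List (List Int))
    (hlen : planets.length ≤ vec.length) (j : Nat) :
    ((bCols cs planets vec).getD j []).length = (vec.getD j []).length := by
  induction cs generalizing vec with
  | nil => rfl
  | cons c0 rest ih =>
    simp only [bCols]
    rw [ih _ (by rw [length_bApply]; exact hlen), length_row_bApply _ _ _ _ hlen]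

theorem bCols_getD (cs : List Nat) (planets vec : List (List Int))
    (hlen : planets.length ≤ vec.length)
    (hrow : ∀ j, j < planets.length → (planets.getD j []).length ≤ (vec.getD j []).length)
    (hnd : cs.Nodup) (j c : Nat) :
    ((bCols cs planets vec).getD j []).getD c 0 =
      (vec.getD j []).getD c 0 +
        (if j < planets.length ∧ c < (planets.getD j []).length ∧ c ∈ cs
         then colDelta planets c ((planets.getD j []).getD c 0) else 0) := by
  induction cs generalizing vec with
  | nil => simp [bCols]
  | cons c0 rest ih =>
    simp only [bCols]
    have hlen' : planets.length ≤ (bApply (bDeltaLoop (bColVals planets c0).length 0 0 (bColVals planets c0) PySem.Dict.empty) c0 0 planets vec).length := by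
      rw [length_bApply]; exact hlen
    have hrow' : ∀ j', j' < planets.length →
        (planets.getD j' []).length ≤ ((bApply (bDeltaLoop (bColVals planets c0).length 0 0 (bColVals planets c0) PySem.Dict.empty) c0 0 planets vec).getD j' []).length := by
      intro j' hj'
      rw [length_row_bApply _ _ _ _ hlen]
      exact hrow j' hj'
    rw [ih _ hlen' hrow' (List.Nodup.of_cons hnd), bApply_entry _ _ _ _ hlen hrow]
    by_cases hj : j < planets.length
    · by_cases hcc : c = c0
      · subst hcc
        have hnotin : c ∉ rest := (List.nodup_cons.mp hnd).1
        by_cases hcl : c < (planets.getD j []).length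
        · rw [if_pos ⟨hj, rfl, hcl⟩, if_neg (fun h => hnotin h.2.2),
            if_pos ⟨hj, hcl, List.mem_cons_self⟩,
            bDelta_col planets c _ (mem_colRaw planets j c hj hcl)]
          ring
        · rw [if_neg (by tauto), if_neg (by tauto), if_neg (by tauto)]
          ring
      · by_cases hcl : c < (planets.getD j []).length
        · by_cases hcr : c ∈ rest
          · rw [if_neg (by tauto), if_pos ⟨hj, hcl, hcr⟩,
              if_pos ⟨hj, hcl, List.mem_cons_of_mem c0 hcr⟩]
            ring
          · rw [if_neg (by tauto), if_neg (by tauto),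
              if_neg (by rintro ⟨-, -, hmem⟩; rcases List.mem_cons.mp hmem with rfl | hm <;> tauto)]
            ring
        · rw [if_neg (by tauto), if_neg (by tauto), if_neg (by tauto)]
          ring
    · rw [if_neg (by tauto), if_neg (by tauto), if_neg (by tauto)]
      ring

theorem sum_sgn_eq_colDelta (planets : List (List Int)) (pli : List Int) (c : Nat) :
    (planets.map (fun pj => if c < min pli.length pj.length then sgn (pli.getD c 0) (pj.getD c 0) else 0)).sum =
      if c < pli.length then colDelta planets c (pli.getD c 0) else 0 := by
  by_cases h : c < pli.length
  · rw [if_pos h]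
    unfold colDelta
    congr 1
    apply List.map_congr_left
    intro pj _
    by_cases h2 : c < pj.length <;> simp [h, h2]
  · rw [if_neg h]
    rw [List.map_congr_left (g := fun _ => (0 : Int)) (by
      intro pj _
      rw [if_neg (by simp; omega)])]
    simp

theorem ag_eq_alt (planets vec : List (List Int))
    (hl : planets.length ≤ vec.length)
    (hz : ∀ pr ∈ planets.zip vec, pr.1.length ≤ pr.2.length) :
    agOuter planets planets 0 vec = bCols (List.range (bMaxLen planets 0)) planets vec := by
  have hrow : ∀ j, j < planets.length → (planets.getD j []).length ≤ (vec.getD j []).length := by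
    intro j hj
    have hjv : j < vec.length := lt_of_lt_of_le hj hl
    have hmem : (planets[j], vec[j]) ∈ planets.zip vec := by
      have hg : (planets.zip vec)[j]'(by simp [List.length_zip]; omega) = (planets[j], vec[j]) :=
        List.getElem_zip
      rw [← hg]
      exact List.getElem_mem _
    have hle := hz _ hmem
    rw [List.getD_eq_getElem planets [] hj, List.getD_eq_getElem vec [] hjv]
    exact hle
  have hA0 : (0 : Nat) + planets.length ≤ vec.length := by omega
  apply List.ext_getElem
  · rw [length_agOuter, length_bCols]
  intro j h1 h2
  have hjv : j < vec.length := by rw [length_agOuter] at h1; exact h1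
  rw [← List.getD_eq_getElem _ [] h1, ← List.getD_eq_getElem _ [] h2,
    agOuter_getD planets planets 0 vec hA0 j]
  by_cases hj : j < planets.length
  · rw [if_pos (by omega)]
    simp only [Nat.sub_zero]
    apply List.ext_getElem
    · rw [length_agMid _ _ _ (hrow j hj), length_row_bCols _ _ _ hl]
    intro c hc1 hc2
    rw [← List.getD_eq_getElem _ 0 hc1, ← List.getD_eq_getElem _ 0 hc2,
      agMid_getD planets _ _ (hrow j hj) c,
      bCols_getD _ planets vec hl hrow (List.nodup_range) j c,
      sum_sgn_eq_colDelta]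
    congr 1
    by_cases hcp : c < (planets.getD j []).length
    · rw [if_pos hcp, if_pos ⟨hj, hcp, List.mem_range.mpr (lt_of_lt_of_le hcp
        (length_le_bMaxLen planets 0 _ (by
          rw [List.getD_eq_getElem planets [] hj]
          exact List.getElem_mem hj)))⟩]
    · rw [if_neg hcp, if_neg (by tauto)]
  · rw [if_neg (by omega)]
    apply List.ext_getElem
    · rw [length_row_bCols _ _ _ hl]
    intro c hc1 hc2
    rw [← List.getD_eq_getElem _ 0 hc1, ← List.getD_eq_getElem _ 0 hc2,
      bCols_getD _ planets vec hl hrow (List.nodup_range) j c,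
      if_neg (by tauto)]
    ring

-- ===== VERDICT (by name: the statement is the Claim_ definition above) =====
theorem activate_gravity_spec : Claim_equal_activate_gravity := by
  intro planets vec_planet_map _ hPre
  unfold Spec_activate_gravity activate_gravity activate_gravity_alt
  exact ag_eq_alt planets vec_planet_map hPre.1 hPre.2
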